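-- pv_equiv track=rewrite | github.com/nivethasathiya/nivetha2 | nivetha2.py | numKRepeating
-- ===== SOURCE A (Python) =====
-- def numKRepeating(arr, n, k):
--     num = 0
--     visited = [False for i in range(n)]
--     for i in range(0, n, 1):
--         if (visited[i] == True):
--             continue
--         count = 1
--         for j in range(i + 1, n, 1):
--             if (arr[i] == arr[j]):
--                 count += 1
--                 visited[j] = True
--
--         if (count == k):
--             num += arr[i]
--
--     return num
-- ===== SOURCE B (Python) =====
-- def numKRepeating(arr, n, k):
--     counts = {}
--     for i in range(n):
--         x = arr[i]
--         counts[x] = counts.get(x, 0) + 1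
--     return sum(x for x, c in counts.items() if c == k)
-- ===== Notes on version B (the rewrite author's own statement) =====
-- stated objective: faster
-- what changed: Replaces the O(n^2) nested scan with a visited array by a single counting pass over arr[:n] using a dict, then sums the distinct values whose count equals k.
-- outside the precondition, e.g. on numKRepeating([], 1, 5): A returns 0, B raises IndexError
import Mathlib
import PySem

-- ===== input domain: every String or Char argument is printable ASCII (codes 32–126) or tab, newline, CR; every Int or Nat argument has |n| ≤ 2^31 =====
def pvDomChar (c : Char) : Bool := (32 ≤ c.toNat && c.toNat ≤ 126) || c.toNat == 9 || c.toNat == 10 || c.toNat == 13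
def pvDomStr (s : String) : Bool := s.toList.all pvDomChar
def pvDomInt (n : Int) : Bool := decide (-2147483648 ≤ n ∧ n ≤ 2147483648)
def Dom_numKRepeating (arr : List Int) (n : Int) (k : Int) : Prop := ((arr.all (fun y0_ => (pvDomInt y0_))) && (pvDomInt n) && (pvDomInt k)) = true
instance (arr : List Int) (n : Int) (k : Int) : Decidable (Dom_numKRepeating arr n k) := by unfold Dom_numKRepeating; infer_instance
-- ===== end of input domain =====

-- B replaces A's quadratic nested scan with a visited array by one counting pass
-- over arr[:n] using a dict, then sums the distinct values whose count equals k.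


-- ===== PORT A =====
def numKRepeating (arr : List Int) (n : Int) (k : Int) : Int :=
  let visited0 : List Bool := (PySem.List.pyRange 0 n 1).map (fun _ => false)
  let r :=
    (PySem.List.pyRange 0 n 1).foldl
      (fun s i =>
        if PySem.List.pyGetD s.2 i false then s
        else
          let inner :=
            (PySem.List.pyRange (i + 1) n 1).foldl
              (fun cv j =>
                if PySem.List.pyGetD arr i 0 == PySem.List.pyGetD arr j 0 then
                  (cv.1 + 1, cv.2.set j.toNat true)
                else cv)
              ((1 : Int), s.2)
          if inner.1 == k then (s.1 + PySem.List.pyGetD arr i 0, inner.2)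
          else (s.1, inner.2))
      ((0 : Int), visited0)
  r.1

-- ===== PORT B =====
def numKRepeating_alt (arr : List Int) (n : Int) (k : Int) : Int :=
  let counts :=
    (PySem.List.pyRange 0 n 1).foldl
      (fun d i =>
        let x := PySem.List.pyGetD arr i 0
        d.insert x (d.getD x 0 + 1))
      (PySem.Dict.empty : PySem.Dict Int Int)
  counts.items.foldl (fun s p => if p.2 == k then s + p.1 else s) 0

-- ===== PRECONDITION & SPEC =====
-- Pre_ excludes the inputs with n > len(arr), on which A raises IndexError except in the accidental corner arr = [], n = 1, k != 1, where A's lazy element access returns 0 while the natural B raises IndexError reading arr[0].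
def Pre_numKRepeating (arr : List Int) (n : Int) (k : Int) : Prop := n ≤ (arr.length : Int)
instance (arr : List Int) (n : Int) (k : Int) : Decidable (Pre_numKRepeating arr n k) := by unfold Pre_numKRepeating; infer_instance
def pvWitness_numKRepeating : List Int × Int × Int := ([1, 2, 2, 3], 4, 2)

def Spec_numKRepeating (arr : List Int) (n : Int) (k : Int) (out : Int) : Prop := out = numKRepeating_alt arr n k
instance (arr : List Int) (n : Int) (k : Int) (out : Int) : Decidable (Spec_numKRepeating arr n k out) := by unfold Spec_numKRepeating; infer_instance

-- ===== CLAIM (what is proved, stated in full; the proofs are below) =====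
def Claim_equal_numKRepeating : Prop := ∀ (arr : List Int) (n : Int) (k : Int), Dom_numKRepeating arr n k → Pre_numKRepeating arr n k → Spec_numKRepeating arr n k (numKRepeating arr n k)

-- ===== LEMMAS AND PROOFS =====
def gI (t : List Int) (j : Int) : Int := PySem.List.pyGetD t j 0
def fOcc (t : List Int) (i : Int) : Bool :=
  !((PySem.List.pyRange 0 i 1).any (fun i' => gI t i' == gI t i))
def visL (t : List Int) (m : Int) : List Bool :=
  (PySem.List.pyRange 0 (t.length : Int) 1).map
    (fun j => (PySem.List.pyRange 0 (min m j) 1).any (fun i => gI t i == gI t j))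

lemma visL_zero (t : List Int) :
    visL t 0 = (PySem.List.pyRange 0 (t.length : Int) 1).map (fun _ => false) := by
  unfold visL
  apply List.map_congr_left
  intro j hj
  have := (PySem.List.mem_pyRange_one).1 hj
  have hmin : min (0:Int) j = 0 := by omega
  simp [hmin, PySem.List.pyRange_one_eq_nil (le_refl (0:Int))]

lemma getD_visL (t : List Int) (m i : Int) (h0 : 0 ≤ i) (h1 : i < (t.length : Int)) :
    PySem.List.pyGetD (visL t m) i false
      = (PySem.List.pyRange 0 (min m i) 1).any (fun i' => gI t i' == gI t i) := by
  unfold visL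
  exact PySem.List.pyGetD_map_pyRange_of_nonneg _ _ i false h0 h1

lemma length_foldl_set (p : Int → Bool) (l : List Int) (v : List Bool) :
    (l.foldl (fun w j => if p j then w.set j.toNat true else w) v).length = v.length := by
  induction l generalizing v with
  | nil => rfl
  | cons j l ih =>
    simp only [List.foldl_cons]
    by_cases h : p j
    · simp [h, ih, List.length_set]
    · simp [h, ih]

lemma getD_foldl_set (p : Int → Bool) (l : List Int) (v : List Bool) (jq : Nat)
    (hl : ∀ j ∈ l, 0 ≤ j) (hjq : jq < v.length) :
    (l.foldl (fun w j => if p j then w.set j.toNat true else w) v).getD jq false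
      = (v.getD jq false || l.any (fun j => p j && (j == (jq : Int)))) := by
  induction l generalizing v with
  | nil => simp
  | cons j l ih =>
    have hj : 0 ≤ j := hl j (by simp)
    have hl' : ∀ x ∈ l, 0 ≤ x := fun x hx => hl x (by simp [hx])
    simp only [List.foldl_cons, List.any_cons]
    by_cases h : p j
    · by_cases he : j = (jq : Int)
      · have hn : j.toNat = jq := by omega
        rw [if_pos h, ih _ hl' (by simpa using hjq)]
        simp [hn, List.getD_eq_getElem?_getD, List.getElem?_set, hjq, h, he]
        exact Or.inr (Or.inl (he ▸ h))
      · have hne : j.toNat ≠ jq := by omega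
        rw [if_pos h, ih _ hl' (by simpa using hjq)]
        have : (j == (jq : Int)) = false := by simp [he]
        simp [this, List.getD_eq_getElem?_getD, List.getElem?_set, hne]
    · rw [if_neg h, ih _ hl' hjq]
      have : (p j && (j == (jq : Int))) = false := by simp [h]
      simp [this]
def numV (t : List Int) (k m : Int) : Int :=
  (((PySem.List.pyRange 0 m 1).filter
      (fun i => fOcc t i && ((t.count (gI t i) : Int) == k))).map (gI t)).sum

lemma length_visL (t : List Int) (m : Int) : (visL t m).length = t.length := by
  simp [visL, PySem.List.length_pyRange_one]

lemma visL_succ_skip (t : List Int) (m : Int) (h0 : 0 ≤ m) (hf : fOcc t m = false) :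
    visL t (m + 1) = visL t m := by
  unfold visL
  apply List.map_congr_left
  intro j hj
  have hjb := (PySem.List.mem_pyRange_one).1 hj
  by_cases hcase : j ≤ m
  · have : min (m + 1) j = min m j := by omega
    rw [this]
  · have hm1 : min (m + 1) j = m + 1 := by omega
    have hm2 : min m j = m := by omega
    rw [hm1, hm2, PySem.List.pyRange_one_succ_right h0, List.any_append]
    simp only [List.any_cons, List.any_nil, Bool.or_false]
    by_cases heq : gI t m == gI t j
    · have heq' : gI t m = gI t j := by simpa using heq
      have hany : (PySem.List.pyRange 0 m 1).any (fun i => gI t i == gI t m) = true := by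
        simpa [fOcc] using hf
      obtain ⟨i, hi, hie⟩ := List.any_eq_true.1 hany
      have : (PySem.List.pyRange 0 m 1).any (fun i => gI t i == gI t j) = true := by
        refine List.any_eq_true.2 ⟨i, hi, ?_⟩
        have : gI t i = gI t m := by simpa using hie
        simp [this, heq']
      simp [this, heq]
    · simp [heq]

lemma numV_succ (t : List Int) (k m : Int) (h0 : 0 ≤ m) :
    numV t k (m + 1)
      = numV t k m
        + (if fOcc t m && ((t.count (gI t m) : Int) == k) then gI t m else 0) := by
  unfold numV
  rw [PySem.List.pyRange_one_succ_right h0, List.filter_append, List.map_append,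
    List.sum_append]
  by_cases h : fOcc t m && ((t.count (gI t m) : Int) == k)
  · simp [List.filter_cons, h]
  · simp [List.filter_cons, h]

lemma inner_count (t : List Int) (m : Int) (h0 : 0 ≤ m) :
    (PySem.List.pyRange (m + 1) (t.length : Int) 1).foldl
        (fun c j => if gI t m == gI t j then c + 1 else c) (1 : Int)
      = 1 + ((t.drop (m + 1).toNat).count (gI t m) : Int) := by
  have hcomm : (fun (c : Int) (j : Int) => if gI t m == gI t j then c + 1 else c)
      = (fun (c : Int) (j : Int) =>
          if PySem.List.pyGetD t j 0 == gI t m then c + 1 else c) := by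
    funext c j
    have : (gI t m == gI t j) = (PySem.List.pyGetD t j 0 == gI t m) := by
      rw [show gI t j = PySem.List.pyGetD t j 0 from rfl]
      by_cases h : gI t m = PySem.List.pyGetD t j 0
      · simp [h]
      · simp [h, Ne.symm h]
    rw [this]
  have h2 := PySem.List.foldl_pyRange_pyGetD' t 0
    (fun (c : Int) x => if x == gI t m then c + 1 else c) (1 : Int) (a := m + 1) (by omega)
  beta_reduce at h2
  rw [hcomm]
  exact h2.trans (PySem.List.foldl_beq_add_one (t.drop (m + 1).toNat) (gI t m) (1 : Int))

lemma getD_visL_nat (t : List Int) (m : Int) (jq : Nat) (h : jq < t.length) :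
    (visL t m).getD jq false
      = (PySem.List.pyRange 0 (min m (jq : Int)) 1).any
          (fun i => gI t i == gI t (jq : Int)) := by
  have h1 := getD_visL t m (jq : Int) (by omega) (by exact_mod_cast h)
  rw [← h1, PySem.List.pyGetD_eq_getElem (visL t m) (i := (jq : Int)) false (by omega)
      (by rw [length_visL]; exact_mod_cast h)]
  rw [List.getD_eq_getElem _ _ (by rw [length_visL]; exact h)]
  simp

lemma visL_succ_mark (t : List Int) (m : Int) (h0 : 0 ≤ m) (h1 : m < (t.length : Int)) :
    (PySem.List.pyRange (m + 1) (t.length : Int) 1).foldl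
        (fun w j => if gI t m == gI t j then w.set j.toNat true else w) (visL t m)
      = visL t (m + 1) := by
  apply List.ext_getElem
  · rw [length_foldl_set, length_visL, length_visL]
  · intro jq hjq1 hjq2
    have hjq : jq < t.length := by rw [length_visL] at hjq2; exact hjq2
    rw [← List.getD_eq_getElem _ false hjq1, ← List.getD_eq_getElem _ false hjq2]
    rw [getD_foldl_set _ _ _ _ (fun j hj => by
        have := PySem.List.mem_pyRange_one.1 hj; omega)
      (by rw [length_visL]; exact hjq)]
    rw [getD_visL_nat t m jq hjq, getD_visL_nat t (m + 1) jq hjq]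
    by_cases hcase : (jq : Int) ≤ m
    · have e1 : min (m + 1) (jq : Int) = min m (jq : Int) := by omega
      rw [e1]
      have : (PySem.List.pyRange (m + 1) (t.length : Int) 1).any
          (fun j => (gI t m == gI t j) && (j == (jq : Int))) = false := by
        rw [List.any_eq_false]
        intro j hj
        have := PySem.List.mem_pyRange_one.1 hj
        have : (j == (jq : Int)) = false := by simp; omega
        simp [this]
      simp [this]
    · have e1 : min (m + 1) (jq : Int) = m + 1 := by omega
      have e2 : min m (jq : Int) = m := by omega
      rw [e1, e2, PySem.List.pyRange_one_succ_right h0, List.any_append]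
      have : (PySem.List.pyRange (m + 1) (t.length : Int) 1).any
          (fun j => (gI t m == gI t j) && (j == (jq : Int)))
          = (gI t m == gI t (jq : Int)) := by
        by_cases hg : gI t m == gI t (jq : Int)
        · rw [hg]
          rw [List.any_eq_true]
          refine ⟨(jq : Int), PySem.List.mem_pyRange_one.2 (by omega), by simp [hg]⟩
        · have hgf : (gI t m == gI t (jq : Int)) = false := Bool.eq_false_iff.2 hg
          rw [hgf, List.any_eq_false]
          intro j hj
          by_cases hjj : j = (jq : Int)
          · subst hjj; simp [hgf]
          · simp [hjj]
      rw [this]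
      simp

lemma gI_eq_getElem (t : List Int) (i : Int) (h0 : 0 ≤ i) (h1 : i < (t.length : Int)) :
    gI t i = t[i.toNat]'(by omega) := by
  unfold gI
  exact PySem.List.pyGetD_eq_getElem t 0 h0 h1

lemma fOcc_iff_not_mem_take (t : List Int) (m : Int) (h0 : 0 ≤ m)
    (h1 : m ≤ (t.length : Int)) :
    fOcc t m = true ↔ gI t m ∉ t.take m.toNat := by
  unfold fOcc
  rw [Bool.not_eq_eq_eq_not, Bool.not_true, List.any_eq_false]
  constructor
  · intro h hmem
    obtain ⟨iq, hiq, hval⟩ := List.mem_iff_getElem.1 hmem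
    have hiq' : iq < m.toNat := by
      have := hiq
      simp [List.length_take] at this
      omega
    have hgi : gI t (iq : Int) = t[iq]'(by omega) := by
      rw [gI_eq_getElem t (iq : Int) (by omega) (by push_cast; omega)]
      simp
    have := h (iq : Int) (PySem.List.mem_pyRange_one.2 (by omega))
    rw [List.getElem_take] at hval
    simp [hgi, hval] at this
  · intro h i hi
    have hib := PySem.List.mem_pyRange_one.1 hi
    have hgi : gI t i = t[i.toNat]'(by omega) :=
      gI_eq_getElem t i (by omega) (by omega)
    simp only [Bool.eq_false_iff, ne_eq, beq_iff_eq]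
    intro heq
    apply h
    rw [← heq, hgi]
    exact List.mem_take_iff_getElem.2 ⟨i.toNat, by simp [List.length_take]; omega, by
      simp [List.getElem_take]⟩

lemma count_split (t : List Int) (m : Int) (h0 : 0 ≤ m) (h1 : m < (t.length : Int))
    (hf : fOcc t m = true) :
    (t.count (gI t m) : Int) = 1 + ((t.drop (m + 1).toNat).count (gI t m) : Int) := by
  set x := gI t m with hx
  have hc : t.count x = (t.take (m + 1).toNat).count x + (t.drop (m + 1).toNat).count x := by
    conv_lhs => rw [← List.take_append_drop ((m + 1).toNat) t]
    rw [List.count_append]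
  have htake : (t.take (m + 1).toNat).count x = 1 := by
    have he : (m + 1).toNat = m.toNat + 1 := by omega
    rw [he, List.take_add_one]
    have hget : t[m.toNat]? = some (t[m.toNat]'(by omega)) := by
      rw [List.getElem?_eq_getElem]
    rw [hget]
    have hnot := (fOcc_iff_not_mem_take t m h0 (by omega)).1 hf
    rw [List.count_append, List.count_eq_zero.2 (by
        intro hmem
        exact hnot hmem)]
    have hxe : x = t[m.toNat]'(by omega) := by rw [hx]; exact gI_eq_getElem t m h0 h1
    simp [hxe]
  rw [hc, htake]
  push_cast
  ring

def stepA (t : List Int) (k : Int) (s : Int × List Bool) (i : Int) : Int × List Bool :=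
  if PySem.List.pyGetD s.2 i false then s
  else
    let inner :=
      (PySem.List.pyRange (i + 1) (t.length : Int) 1).foldl
        (fun cv j => if gI t i == gI t j then (cv.1 + 1, cv.2.set j.toNat true) else cv)
        ((1 : Int), s.2)
    if inner.1 == k then (s.1 + gI t i, inner.2) else (s.1, inner.2)

lemma invA (t : List Int) (k : Int) (m : Int) (h0 : 0 ≤ m) (h1 : m ≤ (t.length : Int)) :
    (PySem.List.pyRange 0 m 1).foldl (stepA t k) (0, visL t 0)
      = (numV t k m, visL t m) := by
  revert h1
  induction m, h0 using Int.le_induction with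
  | base =>
    intro _
    rw [PySem.List.pyRange_one_eq_nil (le_refl (0 : Int))]
    have : numV t k 0 = 0 := by
      unfold numV
      rw [PySem.List.pyRange_one_eq_nil (le_refl (0 : Int))]
      rfl
    simp [this]
  | succ n hn ih =>
    intro h1
    have hnlt : n < (t.length : Int) := by omega
    rw [PySem.List.pyRange_one_succ_right hn, List.foldl_append, ih (by omega)]
    simp only [List.foldl_cons, List.foldl_nil]
    unfold stepA
    have hvis : PySem.List.pyGetD (visL t n) n false
        = !(fOcc t n) := by
      rw [getD_visL t n n hn hnlt]
      unfold fOcc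
      simp
    by_cases hf : fOcc t n = true
    · rw [hvis, hf]
      simp only [Bool.not_true, if_false, Bool.false_eq_true]
      have hsplit : (fun (cv : Int × List Bool) (j : Int) =>
            if gI t n == gI t j then (cv.1 + 1, cv.2.set j.toNat true) else cv)
          = (fun (cv : Int × List Bool) (j : Int) =>
              ((fun (c : Int) (j : Int) => if gI t n == gI t j then c + 1 else c) cv.1 j,
               (fun (w : List Bool) (j : Int) =>
                  if gI t n == gI t j then w.set j.toNat true else w) cv.2 j)) := by
        funext cv j
        by_cases h : gI t n == gI t j <;> simp [h]
      rw [hsplit, PySem.List.foldl_prod_mk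
          (f := fun (c : Int) (j : Int) => if gI t n == gI t j then c + 1 else c)
          (g := fun (w : List Bool) (j : Int) =>
            if gI t n == gI t j then w.set j.toNat true else w),
        inner_count t n hn, visL_succ_mark t n hn hnlt]
      rw [← count_split t n hn hnlt hf]
      rw [numV_succ t k n hn, hf]
      by_cases hck : ((t.count (gI t n) : Int) == k) = true
      · simp [hck]
      · simp only [Bool.not_eq_true] at hck
        simp [hck]
    · simp only [Bool.not_eq_true] at hf
      rw [hvis, hf]
      simp only [Bool.not_false, if_true]
      rw [numV_succ t k n hn, hf, visL_succ_skip t n hn hf]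
      simp

lemma gI_take (arr : List Int) (n i : Int) (hn : n ≤ (arr.length : Int))
    (h0 : 0 ≤ i) (h1 : i < n) :
    gI (arr.take n.toNat) i = PySem.List.pyGetD arr i 0 := by
  have hlt : (arr.take n.toNat).length = n.toNat := by
    simp [List.length_take]
    omega
  rw [gI_eq_getElem (arr.take n.toNat) i h0 (by rw [hlt]; omega),
    PySem.List.pyGetD_eq_getElem arr 0 h0 (by omega)]
  simp [List.getElem_take]

lemma dedup_filter_aux (t : List Int) :
    ∀ m : Nat, m ≤ t.length →
      ((PySem.List.pyRange 0 (m : Int) 1).filter (fOcc t)).map (gI t)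
        = PySem.Set.ofList (t.take m) := by
  intro m
  induction m with
  | zero =>
    intro _
    simp only [Nat.cast_zero]
    rw [PySem.List.pyRange_one_eq_nil (le_refl (0 : Int))]
    rfl
  | succ m ih =>
    intro hm
    have hcast : ((m + 1 : Nat) : Int) = (m : Int) + 1 := by push_cast; ring
    rw [hcast, PySem.List.pyRange_one_succ_right (by positivity), List.filter_append,
      List.map_append, ih (by omega), List.take_add_one,
      List.getElem?_eq_getElem (by omega : m < t.length)]
    have hofl : PySem.Set.ofList (t.take m ++ [t[m]'(by omega)])
        = PySem.Set.add (PySem.Set.ofList (t.take m)) (t[m]'(by omega)) := by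
      rw [PySem.Set.ofList_eq_foldl, List.foldl_append, ← PySem.Set.ofList_eq_foldl]
      rfl
    simp only [Option.toList_some]
    rw [hofl]
    have hgm : gI t (m : Int) = t[m]'(by omega) := by
      rw [gI_eq_getElem t (m : Int) (by positivity) (by exact_mod_cast by omega)]
      simp
    have hiff := fOcc_iff_not_mem_take t (m : Int) (by positivity)
      (by exact_mod_cast Nat.le_of_succ_le hm)
    rw [hgm] at hiff
    simp only [Int.toNat_natCast] at hiff
    by_cases hf : fOcc t (m : Int) = true
    · have hnot := hiff.1 hf
      have hcont : (PySem.Set.ofList (t.take m)).contains (t[m]'(by omega)) = false := by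
        rw [Bool.eq_false_iff]
        intro hc
        exact hnot ((PySem.Set.mem_ofList _ _).1 ((PySem.Set.contains_iff _ _).1 hc))
      rw [List.filter_cons, if_pos hf]
      simp only [List.filter_nil, List.map_cons, List.map_nil]
      rw [hgm]
      simp [PySem.Set.add, hcont]
      exact hnot
    · have hfm : fOcc t (m : Int) = false := by simpa using hf
      have hmem : t[m]'(by omega) ∈ t.take m := by
        by_contra hnm
        exact absurd (hiff.2 hnm) (by simp [hfm])
      have hcont : (PySem.Set.ofList (t.take m)).contains (t[m]'(by omega)) = true := by
        rw [PySem.Set.contains_iff, PySem.Set.mem_ofList]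
        exact hmem
      rw [List.filter_cons, if_neg (by simp [hfm])]
      simp [PySem.Set.add, hcont]
      exact hmem

lemma dedup_filter (t : List Int) :
    ((PySem.List.pyRange 0 (t.length : Int) 1).filter (fOcc t)).map (gI t)
      = PySem.Set.ofList t := by
  have := dedup_filter_aux t t.length (le_refl _)
  simpa using this

lemma final_bridge (t : List Int) (k : Int) :
    numV t k (t.length : Int)
      = ((PySem.Set.ofList t).filter (fun v => (t.count v : Int) == k)).sum := by
  unfold numV
  have h1 : (fun i => fOcc t i && ((t.count (gI t i) : Int) == k))
      = (fun i => (((fun v => (t.count v : Int) == k) ∘ (gI t)) i && fOcc t i)) := by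
    funext i
    simp [Bool.and_comm]
  rw [h1, ← List.filter_filter, ← List.filter_map, dedup_filter]

lemma A_eq (arr : List Int) (n k : Int) (h0 : 0 ≤ n) (h1 : n ≤ (arr.length : Int)) :
    numKRepeating arr n k = numV (arr.take n.toNat) k n := by
  unfold numKRepeating
  set t := arr.take n.toNat with ht
  have hlen : (t.length : Int) = n := by
    rw [ht]
    simp [List.length_take]
    omega
  have hinit : (PySem.List.pyRange 0 n 1).map (fun _ => false) = visL t 0 := by
    rw [visL_zero, hlen]
  simp only [hinit]
  have hcongr : (PySem.List.pyRange 0 n 1).foldl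
      (fun s i =>
        if PySem.List.pyGetD s.2 i false then s
        else
          let inner :=
            (PySem.List.pyRange (i + 1) n 1).foldl
              (fun cv j =>
                if PySem.List.pyGetD arr i 0 == PySem.List.pyGetD arr j 0 then
                  (cv.1 + 1, cv.2.set j.toNat true)
                else cv)
              ((1 : Int), s.2)
          if inner.1 == k then (s.1 + PySem.List.pyGetD arr i 0, inner.2)
          else (s.1, inner.2))
      ((0 : Int), visL t 0)
      = (PySem.List.pyRange 0 n 1).foldl (stepA t k) ((0 : Int), visL t 0) := by
    apply PySem.List.foldl_congr_mem
    intro s i hi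
    have hib := PySem.List.mem_pyRange_one.1 hi
    have hgi : PySem.List.pyGetD arr i 0 = gI t i := by
      rw [ht, gI_take arr n i h1 hib.1 hib.2]
    have hinner : (PySem.List.pyRange (i + 1) n 1).foldl
        (fun cv j =>
          if PySem.List.pyGetD arr i 0 == PySem.List.pyGetD arr j 0 then
            (cv.1 + 1, cv.2.set j.toNat true)
          else cv)
        ((1 : Int), s.2)
        = (PySem.List.pyRange (i + 1) (t.length : Int) 1).foldl
            (fun cv j => if gI t i == gI t j then (cv.1 + 1, cv.2.set j.toNat true) else cv)
            ((1 : Int), s.2) := by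
      rw [hlen]
      apply PySem.List.foldl_congr_mem
      intro cv j hj
      have hjb := PySem.List.mem_pyRange_one.1 hj
      have hgj : PySem.List.pyGetD arr j 0 = gI t j := by
        rw [ht, gI_take arr n j h1 (by omega) hjb.2]
      rw [hgi, hgj]
    simp only [stepA]
    rw [hinner, hgi]
  rw [hcongr, invA t k n h0 (by omega)]

lemma B_eq (arr : List Int) (n k : Int) (h0 : 0 ≤ n) (h1 : n ≤ (arr.length : Int)) :
    numKRepeating_alt arr n k
      = ((PySem.Set.ofList (arr.take n.toNat)).filter
          (fun v => ((arr.take n.toNat).count v : Int) == k)).sum := by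
  unfold numKRepeating_alt
  set t := arr.take n.toNat with ht
  have hlen : (t.length : Int) = n := by
    rw [ht]
    simp [List.length_take]
    omega
  have hcongr : (PySem.List.pyRange 0 n 1).foldl
      (fun d i =>
        let x := PySem.List.pyGetD arr i 0
        d.insert x (d.getD x 0 + 1))
      (PySem.Dict.empty : PySem.Dict Int Int)
      = (PySem.List.pyRange 0 (t.length : Int) 1).foldl
          (fun d j =>
            (fun (d : PySem.Dict Int Int) (x : Int) => d.insert x (d.getD x 0 + 1)) d
              (PySem.List.pyGetD t j 0))
          (PySem.Dict.empty : PySem.Dict Int Int) := by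
    rw [hlen]
    apply PySem.List.foldl_congr_mem
    intro d i hi
    have hib := PySem.List.mem_pyRange_one.1 hi
    have hgi : PySem.List.pyGetD arr i 0 = PySem.List.pyGetD t i 0 := by
      rw [ht]
      exact (gI_take arr n i h1 hib.1 hib.2).symm
    simp only [hgi]
  rw [hcongr, PySem.List.foldl_pyRange_pyGetD' t 0
      (fun (d : PySem.Dict Int Int) (x : Int) => d.insert x (d.getD x 0 + 1))
      (PySem.Dict.empty : PySem.Dict Int Int) (a := 0) (le_refl 0)]
  simp only [Int.toNat_zero, List.drop_zero]
  rw [PySem.Dict.foldl_insert_getD_add_one_eq_counter, PySem.Dict.items_counter]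
  rw [List.foldl_map]
  have hfun : (fun (s : Int) (v : Int) =>
      (fun (s : Int) (p : Int × Int) => if p.2 == k then s + p.1 else s) s
        (v, (t.count v : Int)))
      = (fun (s : Int) (v : Int) => if ((t.count v : Int) == k) then s + v else s) := by
    funext s v
    rfl
  rw [hfun, PySem.List.foldl_if_eq_foldl_filter (fun v => ((t.count v : Int) == k))
      (fun (s : Int) (v : Int) => s + v)]
  rw [PySem.List.foldl_add _ (fun v => v) 0]
  simp

lemma portA_eq_portB (arr : List Int) (n k : Int) (h1 : n ≤ (arr.length : Int)) :
    numKRepeating arr n k = numKRepeating_alt arr n k := by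
  by_cases h0 : 0 ≤ n
  · have ht : ((arr.take n.toNat).length : Int) = n := by
      simp [List.length_take]; omega
    rw [A_eq arr n k h0 h1, B_eq arr n k h0 h1, ← final_bridge]
    rw [ht]
  · have hneg : n < 0 := by omega
    simp [numKRepeating, numKRepeating_alt,
      PySem.List.pyRange_one_eq_nil (le_of_lt hneg), PySem.Dict.empty]

-- ===== VERDICT (by name: the statement is the Claim_ definition above) =====
theorem numKRepeating_spec : Claim_equal_numKRepeating := by
  intro arr n k _ hpre
  unfold Spec_numKRepeating
  exact portA_eq_portB arr n k hpre
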